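-- pv_equiv track=rewrite | github.com/FedericoFuidio/parada1 | parada/views.py | estimated_time
-- ===== SOURCE A (Python) =====
-- parada_actual = "parada2"
--
-- tiempo_promedio_entre_paradas = 3
--
-- def estimated_time(next_time, prox_parada, linea):
--
--     if prox_parada == parada_actual:
--         return next_time
--
--     time = 0
--     start_count = False
--     for k in linea['recorrido'].keys():
--         parada = linea['recorrido'][k]
--
--         if start_count:
--             time += tiempo_promedio_entre_paradas
--             if parada == parada_actual:
--                 return time
--
--         if not start_count:
--             if parada == prox_parada:
--                 time += next_time
--                 start_count = True
--
--     return time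
-- ===== SOURCE B (Python) =====
-- parada_actual = "parada2"
--
-- tiempo_promedio_entre_paradas = 3
--
-- def estimated_time(next_time, prox_parada, linea):
--     if prox_parada == parada_actual:
--         return next_time
--     vals = list(linea['recorrido'].values())
--     try:
--         i = vals.index(prox_parada)
--     except ValueError:
--         return 0
--     try:
--         j = vals.index(parada_actual, i + 1)
--     except ValueError:
--         return next_time + tiempo_promedio_entre_paradas * (len(vals) - 1 - i)
--     return next_time + tiempo_promedio_entre_paradas * (j - i)
-- ===== Notes on version B (the rewrite author's own statement) =====
-- stated objective: simpler
-- what changed: Replaces A's stateful key-walking loop (start_count flag, running time accumulator, per-key dict lookups) with two positional index searches over the values list and one closed-form arithmetic expression per case.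
import Mathlib
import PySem

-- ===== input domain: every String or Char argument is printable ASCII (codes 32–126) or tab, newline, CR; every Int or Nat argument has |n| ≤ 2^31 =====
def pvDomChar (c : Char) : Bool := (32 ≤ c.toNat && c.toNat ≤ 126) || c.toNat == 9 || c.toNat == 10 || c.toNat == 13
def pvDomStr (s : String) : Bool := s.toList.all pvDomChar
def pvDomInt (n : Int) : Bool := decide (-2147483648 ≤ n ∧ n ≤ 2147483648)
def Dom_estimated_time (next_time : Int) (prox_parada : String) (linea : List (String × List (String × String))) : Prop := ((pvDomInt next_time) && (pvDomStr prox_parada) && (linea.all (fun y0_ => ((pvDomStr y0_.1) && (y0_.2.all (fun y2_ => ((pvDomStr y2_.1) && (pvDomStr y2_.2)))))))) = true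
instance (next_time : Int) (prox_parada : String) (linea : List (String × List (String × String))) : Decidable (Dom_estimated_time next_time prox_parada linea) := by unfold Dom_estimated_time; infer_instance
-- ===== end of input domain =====

-- B replaces A's stateful flag-and-accumulator walk over the route keys with two index searches
-- over the values list and a closed-form expression per case (objective: simpler).

-- ===== PORT A =====
-- A's for-loop over linea['recorrido'].keys() with state (time, start_count) and early returns
def pvLoopA (next_time : Int) (prox_parada : String) (recd : PySem.Dict String String) (ks : List String) (time : Int) (start_count : Bool) : Int :=
  match ks with
  | [] => time
  | k :: rest =>
    if start_count then
      if recd.getD k "" == "parada2" then time + 3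
      else pvLoopA next_time prox_parada recd rest (time + 3) true
    else
      if recd.getD k "" == prox_parada then pvLoopA next_time prox_parada recd rest (time + next_time) true
      else pvLoopA next_time prox_parada recd rest time false

def estimated_time (next_time : Int) (prox_parada : String) (linea : List (String × List (String × String))) : Int :=
  if prox_parada == "parada2" then next_time
  else
    let recd := PySem.Dict.ofList ((PySem.Dict.ofList linea).getD "recorrido" [])
    pvLoopA next_time prox_parada recd recd.keys 0 false

-- ===== PORT B =====
-- vals.index(x, i+1) is ported as index? on the suffix vals.drop (i+1) plus the offset i+1
-- (Python B returns next_time + 3*(j - i) with j absolute, i.e. next_time + 3*(jrel + 1)).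
def estimated_time_alt (next_time : Int) (prox_parada : String) (linea : List (String × List (String × String))) : Int :=
  if prox_parada == "parada2" then next_time
  else
    let vals := (PySem.Dict.ofList ((PySem.Dict.ofList linea).getD "recorrido" [])).values
    match PySem.List.index? vals prox_parada with
    | none => 0
    | some i =>
      match PySem.List.index? (vals.drop (i + 1)) "parada2" with
      | none => next_time + 3 * ((vals.length : Int) - 1 - (i : Int))
      | some jrel => next_time + 3 * ((jrel : Int) + 1)

-- ===== PRECONDITION & SPEC =====
-- Pre_ excludes only inputs where A raises KeyError: 'recorrido' missing from linea
-- (unless the initial guard prox_parada == "parada2" returns before the lookup).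
def Pre_estimated_time (next_time : Int) (prox_parada : String) (linea : List (String × List (String × String))) : Prop :=
  prox_parada = "parada2" ∨ "recorrido" ∈ linea.map (·.1)
instance (next_time : Int) (prox_parada : String) (linea : List (String × List (String × String))) : Decidable (Pre_estimated_time next_time prox_parada linea) := by unfold Pre_estimated_time; infer_instance

def pvWitness_estimated_time : Int × String × (List (String × List (String × String))) :=
  (5, "parada1", [("recorrido", [("k1", "parada1"), ("k2", "parada2")])])

def Spec_estimated_time (next_time : Int) (prox_parada : String) (linea : List (String × List (String × String))) (out : Int) : Prop := out = estimated_time_alt next_time prox_parada linea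
instance (next_time : Int) (prox_parada : String) (linea : List (String × List (String × String))) (out : Int) : Decidable (Spec_estimated_time next_time prox_parada linea out) := by unfold Spec_estimated_time; infer_instance

-- ===== CLAIM (what is proved, stated in full; the proofs are below) =====
def Claim_equal_estimated_time : Prop := ∀ (next_time : Int) (prox_parada : String) (linea : List (String × List (String × String))), Dom_estimated_time next_time prox_parada linea → Pre_estimated_time next_time prox_parada linea → Spec_estimated_time next_time prox_parada linea (estimated_time next_time prox_parada linea)

-- ===== LEMMAS AND PROOFS =====

-- A's loop seen as a pure function of the list of looked-up values.
def pvLoopV (next_time : Int) (prox_parada : String) (vs : List String) (time : Int) (start_count : Bool) : Int :=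
  match vs with
  | [] => time
  | v :: rest =>
    if start_count then
      if v == "parada2" then time + 3
      else pvLoopV next_time prox_parada rest (time + 3) true
    else
      if v == prox_parada then pvLoopV next_time prox_parada rest (time + next_time) true
      else pvLoopV next_time prox_parada rest time false

lemma pvLoopA_eq_loopV (nt : Int) (px : String) (d : PySem.Dict String String) (ks : List String) (t : Int) (sc : Bool) :
    pvLoopA nt px d ks t sc = pvLoopV nt px (ks.map (fun k => d.getD k "")) t sc := by
  induction ks generalizing t sc with
  | nil => rfl
  | cons k rest ih => simp only [pvLoopA, pvLoopV, List.map_cons]; split_ifs <;> simp [ih]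

lemma pvLoopV_true (nt : Int) (px : String) (vs : List String) (t : Int) :
    pvLoopV nt px vs t true =
      match PySem.List.index? vs "parada2" with
      | none => t + 3 * (vs.length : Int)
      | some j => t + 3 * ((j : Int) + 1) := by
  induction vs generalizing t with
  | nil => simp [pvLoopV, PySem.List.index?]
  | cons v rest ih =>
    by_cases hv : v = "parada2"
    · subst hv
      rw [PySem.List.index?_cons_self]
      simp [pvLoopV]
    · rw [PySem.List.index?_cons_of_ne rest hv]
      simp only [pvLoopV, beq_iff_eq, if_neg hv]
      rw [ih]
      cases h : PySem.List.index? rest "parada2" <;> simp [List.length_cons] <;> push_cast <;> ring_nf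

lemma pvLoopV_false (nt : Int) (px : String) (vs : List String) (t : Int) :
    pvLoopV nt px vs t false =
      match PySem.List.index? vs px with
      | none => t
      | some i => pvLoopV nt px (vs.drop (i + 1)) (t + nt) true := by
  induction vs generalizing t with
  | nil => simp [pvLoopV, PySem.List.index?]
  | cons v rest ih =>
    by_cases hv : v = px
    · subst hv
      rw [PySem.List.index?_cons_self]
      simp [pvLoopV]
    · rw [PySem.List.index?_cons_of_ne rest hv]
      simp only [pvLoopV, beq_iff_eq, if_neg hv]
      rw [ih]
      cases h : PySem.List.index? rest px <;> simp

-- ===== VERDICT (by name: the statement is the Claim_ definition above) =====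
theorem estimated_time_spec : Claim_equal_estimated_time := by
  intro nt px linea _hdom _hpre
  unfold Spec_estimated_time estimated_time estimated_time_alt
  by_cases hpx : px = "parada2"
  · simp [hpx]
  · simp only [beq_iff_eq, if_neg hpx]
    set d := PySem.Dict.ofList ((PySem.Dict.ofList linea).getD "recorrido" ([] : List (String × String))) with hd
    have hvals : d.values = d.keys.map (fun k => d.getD k "") :=
      PySem.Dict.values_eq_map_keys d (by rw [hd]; exact PySem.Dict.nodup_keys_ofList _) ""
    rw [pvLoopA_eq_loopV, ← hvals, pvLoopV_false]
    cases hi : PySem.List.index? d.values px with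
    | none => rfl
    | some i =>
      dsimp only
      rw [pvLoopV_true]
      obtain ⟨hk, -, -⟩ := PySem.List.getElem_of_index?_eq_some hi
      cases hj : PySem.List.index? (d.values.drop (i + 1)) "parada2" with
      | none =>
        simp only [List.length_drop]
        have : ((d.values.length - (i + 1) : Nat) : Int) = (d.values.length : Int) - 1 - (i : Int) := by
          omega
        rw [this]; ring
      | some jrel => ring
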